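-- pv_equiv track=rewrite | github.com/JoaoVictorVeronezi/projeto-tcc | src/app.py | categorize_phrases
-- ===== SOURCE A (Python) =====
-- import string
--
-- def categorize_phrases(text: str):
--     phrases = text.split(".")
--     punctuation_marks = string.punctuation
--
--     categories = {
--         "less_than_3_words": 0,
--         "between_3_and_5_words": 0,
--         "between_5_and_10_words": 0,
--         "more_than_10_words": 0,
--         "less_than_25_words": 0,
--         "between_25_and_74_words": 0,
--         "between_75_and_160_words": 0,
--         "more_than_160_words": 0,
--         "punctuation_marks": 0
--     }
--
--     for phrase in phrases:
--         word_count = len(phrase.split())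
--
--         if word_count < 3:
--             categories["less_than_3_words"] += 1
--         elif 3 <= word_count < 5:
--             categories["between_3_and_5_words"] += 1
--         elif 5 <= word_count < 10:
--             categories["between_5_and_10_words"] += 1
--         else:
--             categories["more_than_10_words"] += 1
--
--         if word_count < 25:
--             categories["less_than_25_words"] += 1
--         elif 25 <= word_count < 75:
--             categories["between_25_and_74_words"] += 1
--         elif 75 <= word_count < 160:
--             categories["between_75_and_160_words"] += 1
--         else:
--             categories["more_than_160_words"] += 1
--
--         for char in phrase:
--             if char in punctuation_marks:
--                 categories["punctuation_marks"] += 1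
--
--     return categories
-- ===== SOURCE B (Python) =====
-- import string
-- from collections import Counter
--
--
-- def categorize_phrases(text: str):
--     phrases = text.split(".")
--     tally = Counter(len(p.split()) for p in phrases)
--
--     def total(lo, hi=None):
--         return sum(c for wc, c in tally.items()
--                    if lo <= wc and (hi is None or wc < hi))
--
--     return {
--         "less_than_3_words": total(0, 3),
--         "between_3_and_5_words": total(3, 5),
--         "between_5_and_10_words": total(5, 10),
--         "more_than_10_words": total(10),
--         "less_than_25_words": total(0, 25),
--         "between_25_and_74_words": total(25, 75),
--         "between_75_and_160_words": total(75, 160),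
--         "more_than_160_words": total(160),
--         "punctuation_marks": sum(ch in string.punctuation
--                                  for p in phrases for ch in p),
--     }
-- ===== Notes on version B (the rewrite author's own statement) =====
-- stated objective: alternative
-- what changed: B builds a Counter histogram of per-phrase word counts once and computes each of the eight categories as a range-sum over the histogram's items, assembling the result dict as a single literal, instead of A's per-phrase if/elif chains incrementing a mutable dict; punctuation is tallied in its own comprehension.
import Mathlib
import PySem

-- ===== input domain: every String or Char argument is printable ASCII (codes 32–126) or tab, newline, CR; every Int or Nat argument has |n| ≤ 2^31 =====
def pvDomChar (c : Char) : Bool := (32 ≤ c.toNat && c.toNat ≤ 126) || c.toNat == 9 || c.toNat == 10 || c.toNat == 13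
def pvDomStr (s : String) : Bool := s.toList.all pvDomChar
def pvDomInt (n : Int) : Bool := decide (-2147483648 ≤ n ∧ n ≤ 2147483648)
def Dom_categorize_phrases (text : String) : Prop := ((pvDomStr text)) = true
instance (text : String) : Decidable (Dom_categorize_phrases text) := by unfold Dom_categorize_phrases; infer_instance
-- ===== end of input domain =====

-- B builds a Counter histogram of the per-phrase word counts and computes each
-- category as a range-sum over the histogram's items, assembling the dict as one
-- literal, instead of A's per-phrase if/elif chains (objective: alternative).

-- ===== PORT A =====

-- string.punctuation
def pyPunctuation : List Char := "!\"#$%&'()*+,-./:;<=>?@[\\]^_`{|}~".toList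

def catInit : PySem.Dict String Int :=
  PySem.Dict.ofList [("less_than_3_words", 0), ("between_3_and_5_words", 0),
    ("between_5_and_10_words", 0), ("more_than_10_words", 0),
    ("less_than_25_words", 0), ("between_25_and_74_words", 0),
    ("between_75_and_160_words", 0), ("more_than_160_words", 0),
    ("punctuation_marks", 0)]

-- the body of A's `for phrase in phrases` loop
def phraseStep (cats : PySem.Dict String Int) (phrase : List Char) : PySem.Dict String Int :=
  let wc := (PySem.Chars.split₀ phrase).length
  let cats :=
    if wc < 3 then cats.modify "less_than_3_words" 0 (· + 1)
    else if 3 ≤ wc ∧ wc < 5 then cats.modify "between_3_and_5_words" 0 (· + 1)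
    else if 5 ≤ wc ∧ wc < 10 then cats.modify "between_5_and_10_words" 0 (· + 1)
    else cats.modify "more_than_10_words" 0 (· + 1)
  let cats :=
    if wc < 25 then cats.modify "less_than_25_words" 0 (· + 1)
    else if 25 ≤ wc ∧ wc < 75 then cats.modify "between_25_and_74_words" 0 (· + 1)
    else if 75 ≤ wc ∧ wc < 160 then cats.modify "between_75_and_160_words" 0 (· + 1)
    else cats.modify "more_than_160_words" 0 (· + 1)
  phrase.foldl
    (fun c ch => if pyPunctuation.contains ch then c.modify "punctuation_marks" 0 (· + 1) else c)
    cats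

def categorize_phrases (text : String) : List (String × Int) :=
  ((PySem.Chars.splitOn text.toList ['.']).foldl phraseStep catInit).items

-- ===== PORT B =====

-- sum(c for wc, c in tally.items() if lo <= wc and (hi is None or wc < hi))
def totalB (tally : PySem.Dict Nat Int) (lo : Nat) (hi : Option Nat) : Int :=
  ((tally.items.filter
      (fun kv => lo ≤ kv.1 && (match hi with | none => true | some h => kv.1 < h))).map
    (·.2)).sum

def categorize_phrases_alt (text : String) : List (String × Int) :=
  let phrases := PySem.Chars.splitOn text.toList ['.']
  let tally := PySem.Dict.counter (phrases.map (fun p => (PySem.Chars.split₀ p).length))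
  [("less_than_3_words", totalB tally 0 (some 3)),
   ("between_3_and_5_words", totalB tally 3 (some 5)),
   ("between_5_and_10_words", totalB tally 5 (some 10)),
   ("more_than_10_words", totalB tally 10 none),
   ("less_than_25_words", totalB tally 0 (some 25)),
   ("between_25_and_74_words", totalB tally 25 (some 75)),
   ("between_75_and_160_words", totalB tally 75 (some 160)),
   ("more_than_160_words", totalB tally 160 none),
   ("punctuation_marks",
     (phrases.map (fun p => ((p.countP (fun ch => pyPunctuation.contains ch) : Nat) : Int))).sum)]

-- ===== PRECONDITION & SPEC =====
def Spec_categorize_phrases (text : String) (out : List (String × Int)) : Prop := out = categorize_phrases_alt text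
instance (text : String) (out : List (String × Int)) : Decidable (Spec_categorize_phrases text out) := by unfold Spec_categorize_phrases; infer_instance

-- ===== CLAIM (what is proved, stated in full; the proofs are below) =====
def Claim_equal_categorize_phrases : Prop := ∀ (text : String), Dom_categorize_phrases text → Spec_categorize_phrases text (categorize_phrases text)

-- ===== LEMMAS AND PROOFS =====

-- proof-side canonical dictionary: the nine-key literal with symbolic values
def mkD (a b c d e f g h i : Int) : PySem.Dict String Int :=
  PySem.Dict.mk [("less_than_3_words", a), ("between_3_and_5_words", b),
    ("between_5_and_10_words", c), ("more_than_10_words", d),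
    ("less_than_25_words", e), ("between_25_and_74_words", f),
    ("between_75_and_160_words", g), ("more_than_160_words", h),
    ("punctuation_marks", i)]

-- per-phrase word count and punctuation count
def wcOf (p : List Char) : Nat := (PySem.Chars.split₀ p).length
def pcOf (p : List Char) : Int := ((p.countP (fun ch => pyPunctuation.contains ch) : Nat) : Int)

set_option maxHeartbeats 1000000 in
theorem catInit_eq : catInit = mkD 0 0 0 0 0 0 0 0 0 := rfl

set_option maxHeartbeats 1000000 in
theorem modify1 (a b c d e f g h i : Int) :
    (mkD a b c d e f g h i).modify "less_than_3_words" 0 (· + 1) = mkD (a+1) b c d e f g h i := rfl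
set_option maxHeartbeats 1000000 in
theorem modify2 (a b c d e f g h i : Int) :
    (mkD a b c d e f g h i).modify "between_3_and_5_words" 0 (· + 1) = mkD a (b+1) c d e f g h i := rfl
set_option maxHeartbeats 1000000 in
theorem modify3 (a b c d e f g h i : Int) :
    (mkD a b c d e f g h i).modify "between_5_and_10_words" 0 (· + 1) = mkD a b (c+1) d e f g h i := rfl
set_option maxHeartbeats 1000000 in
theorem modify4 (a b c d e f g h i : Int) :
    (mkD a b c d e f g h i).modify "more_than_10_words" 0 (· + 1) = mkD a b c (d+1) e f g h i := rfl
set_option maxHeartbeats 1000000 in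
theorem modify5 (a b c d e f g h i : Int) :
    (mkD a b c d e f g h i).modify "less_than_25_words" 0 (· + 1) = mkD a b c d (e+1) f g h i := rfl
set_option maxHeartbeats 1000000 in
theorem modify6 (a b c d e f g h i : Int) :
    (mkD a b c d e f g h i).modify "between_25_and_74_words" 0 (· + 1) = mkD a b c d e (f+1) g h i := rfl
set_option maxHeartbeats 1000000 in
theorem modify7 (a b c d e f g h i : Int) :
    (mkD a b c d e f g h i).modify "between_75_and_160_words" 0 (· + 1) = mkD a b c d e f (g+1) h i := rfl
set_option maxHeartbeats 1000000 in
theorem modify8 (a b c d e f g h i : Int) :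
    (mkD a b c d e f g h i).modify "more_than_160_words" 0 (· + 1) = mkD a b c d e f g (h+1) i := rfl
set_option maxHeartbeats 1000000 in
theorem modify9 (a b c d e f g h i : Int) :
    (mkD a b c d e f g h i).modify "punctuation_marks" 0 (· + 1) = mkD a b c d e f g h (i+1) := rfl

theorem mkD_congr {a b c d e f g h i a' b' c' d' e' f' g' h' i' : Int}
    (ha : a = a') (hb : b = b') (hc : c = c') (hd : d = d') (he : e = e')
    (hf : f = f') (hg : g = g') (hh : h = h') (hi : i = i') :
    mkD a b c d e f g h i = mkD a' b' c' d' e' f' g' h' i' := by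
  subst ha hb hc hd he hf hg hh hi; rfl

-- the inner punctuation loop of A increments only the last slot
theorem punct_loop (p : List Char) (a b c d e f g h i : Int) :
    p.foldl (fun c ch => if pyPunctuation.contains ch then c.modify "punctuation_marks" 0 (· + 1) else c)
        (mkD a b c d e f g h i)
      = mkD a b c d e f g h (i + ((p.countP (fun ch => pyPunctuation.contains ch) : Nat) : Int)) := by
  induction p generalizing i with
  | nil => simp [List.countP]
  | cons ch rest ih =>
    simp only [List.foldl_cons, List.countP_cons]
    by_cases hch : pyPunctuation.contains ch = true
    · rw [if_pos hch, modify9, ih]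
      refine mkD_congr rfl rfl rfl rfl rfl rfl rfl rfl ?_
      rw [if_pos hch]
      push_cast
      ring
    · rw [if_neg hch, ih]
      refine mkD_congr rfl rfl rfl rfl rfl rfl rfl rfl ?_
      rw [if_neg hch, Nat.add_zero]

-- indicator of a decidable proposition, as an Int
def ind (P : Prop) [Decidable P] : Int := if P then 1 else 0

-- A's loop body on the canonical dictionary
set_option maxHeartbeats 2000000 in
theorem phraseStep_eq (p : List Char) (a b c d e f g h i : Int) :
    phraseStep (mkD a b c d e f g h i) p =
      mkD (a + ind (wcOf p < 3)) (b + ind (3 ≤ wcOf p ∧ wcOf p < 5))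
        (c + ind (5 ≤ wcOf p ∧ wcOf p < 10)) (d + ind (10 ≤ wcOf p))
        (e + ind (wcOf p < 25)) (f + ind (25 ≤ wcOf p ∧ wcOf p < 75))
        (g + ind (75 ≤ wcOf p ∧ wcOf p < 160)) (h + ind (160 ≤ wcOf p))
        (i + pcOf p) := by
  unfold phraseStep
  dsimp only
  rw [show (PySem.Chars.split₀ p).length = wcOf p from rfl]
  unfold ind pcOf
  split_ifs <;>
    first
    | (rw [modify1]; first
        | (rw [modify5, punct_loop]; exact mkD_congr (by omega) (by omega) (by omega) (by omega) (by omega) (by omega) (by omega) (by omega) rfl)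
        | (rw [modify6, punct_loop]; exact mkD_congr (by omega) (by omega) (by omega) (by omega) (by omega) (by omega) (by omega) (by omega) rfl)
        | (rw [modify7, punct_loop]; exact mkD_congr (by omega) (by omega) (by omega) (by omega) (by omega) (by omega) (by omega) (by omega) rfl)
        | (rw [modify8, punct_loop]; exact mkD_congr (by omega) (by omega) (by omega) (by omega) (by omega) (by omega) (by omega) (by omega) rfl))
    | (rw [modify2]; first
        | (rw [modify5, punct_loop]; exact mkD_congr (by omega) (by omega) (by omega) (by omega) (by omega) (by omega) (by omega) (by omega) rfl)
        | (rw [modify6, punct_loop]; exact mkD_congr (by omega) (by omega) (by omega) (by omega) (by omega) (by omega) (by omega) (by omega) rfl)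
        | (rw [modify7, punct_loop]; exact mkD_congr (by omega) (by omega) (by omega) (by omega) (by omega) (by omega) (by omega) (by omega) rfl)
        | (rw [modify8, punct_loop]; exact mkD_congr (by omega) (by omega) (by omega) (by omega) (by omega) (by omega) (by omega) (by omega) rfl))
    | (rw [modify3]; first
        | (rw [modify5, punct_loop]; exact mkD_congr (by omega) (by omega) (by omega) (by omega) (by omega) (by omega) (by omega) (by omega) rfl)
        | (rw [modify6, punct_loop]; exact mkD_congr (by omega) (by omega) (by omega) (by omega) (by omega) (by omega) (by omega) (by omega) rfl)
        | (rw [modify7, punct_loop]; exact mkD_congr (by omega) (by omega) (by omega) (by omega) (by omega) (by omega) (by omega) (by omega) rfl)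
        | (rw [modify8, punct_loop]; exact mkD_congr (by omega) (by omega) (by omega) (by omega) (by omega) (by omega) (by omega) (by omega) rfl))
    | (rw [modify4]; first
        | (rw [modify5, punct_loop]; exact mkD_congr (by omega) (by omega) (by omega) (by omega) (by omega) (by omega) (by omega) (by omega) rfl)
        | (rw [modify6, punct_loop]; exact mkD_congr (by omega) (by omega) (by omega) (by omega) (by omega) (by omega) (by omega) (by omega) rfl)
        | (rw [modify7, punct_loop]; exact mkD_congr (by omega) (by omega) (by omega) (by omega) (by omega) (by omega) (by omega) (by omega) rfl)
        | (rw [modify8, punct_loop]; exact mkD_congr (by omega) (by omega) (by omega) (by omega) (by omega) (by omega) (by omega) (by omega) rfl))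

-- both folds, characterised over an arbitrary phrase list
theorem foldA (ps : List (List Char)) (a b c d e f g h i : Int) :
    ps.foldl phraseStep (mkD a b c d e f g h i) =
      mkD (a + (ps.countP (fun p => decide (wcOf p < 3)) : Int))
        (b + (ps.countP (fun p => decide (3 ≤ wcOf p ∧ wcOf p < 5)) : Int))
        (c + (ps.countP (fun p => decide (5 ≤ wcOf p ∧ wcOf p < 10)) : Int))
        (d + (ps.countP (fun p => decide (10 ≤ wcOf p)) : Int))
        (e + (ps.countP (fun p => decide (wcOf p < 25)) : Int))
        (f + (ps.countP (fun p => decide (25 ≤ wcOf p ∧ wcOf p < 75)) : Int))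
        (g + (ps.countP (fun p => decide (75 ≤ wcOf p ∧ wcOf p < 160)) : Int))
        (h + (ps.countP (fun p => decide (160 ≤ wcOf p)) : Int))
        (i + (ps.map pcOf).sum) := by
  induction ps generalizing a b c d e f g h i with
  | nil => simp
  | cons p rest ih =>
    simp only [List.foldl_cons, phraseStep_eq, ih, List.countP_cons, List.map_cons, List.sum_cons]
    refine mkD_congr ?_ ?_ ?_ ?_ ?_ ?_ ?_ ?_ ?_ <;> first | (unfold ind; simp only [decide_eq_true_eq]; split_ifs <;> push_cast <;> omega) | ring

-- range predicate used by B's `total`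
def inRange (lo : Nat) (hi : Option Nat) (wc : Nat) : Bool :=
  lo ≤ wc && (match hi with | none => true | some h => wc < h)

-- splitting a countP over "key is k or key occurs in t", for k not in t
theorem countP_cons_contains (l : List Nat) (P : Nat → Bool) (k : Nat) (t : List Nat)
    (hk : k ∉ t) :
    l.countP (fun x => P x && (k :: t).contains x) =
      (if P k then l.count k else 0) + l.countP (fun x => P x && t.contains x) := by
  induction l with
  | nil => simp
  | cons y l' ih =>
    simp only [List.countP_cons, List.count_cons, ih]
    by_cases hy : y = k
    · subst hy
      have hct : t.contains y = false := by simp [List.contains_eq_mem]; exact hk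
      by_cases hP : P y = true
      · simp [hP]
        split_ifs <;> omega
      · simp [hP]
    · have hcc : (k :: t).contains y = t.contains y := by
        simp [hy]
      simp only [hcc, beq_iff_eq, hy, if_false]
      split_ifs <;> omega

-- sum of counts over a nodup key list = countP of "P and key occurs in the list"
theorem sum_count_filter (s : List Nat) (l : List Nat) (P : Nat → Bool) (hs : s.Nodup) :
    ((s.filter P).map (fun k => (l.count k : Int))).sum =
      (l.countP (fun x => P x && s.contains x) : Int) := by
  induction s with
  | nil => simp
  | cons k t ih =>
    rw [List.nodup_cons] at hs
    rw [countP_cons_contains l P k t hs.1]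
    by_cases hPk : P k = true
    · simp only [List.filter_cons, hPk, if_true, List.map_cons, List.sum_cons, ih hs.2]
      push_cast
      ring
    · have hPk' : P k = false := by simpa using hPk
      simp [hPk', ih hs.2]

-- B's `total` over the counter = a countP over the word-count list
theorem total_eq (l : List Nat) (lo : Nat) (hi : Option Nat) :
    totalB (PySem.Dict.counter l) lo hi = (l.countP (inRange lo hi) : Int) := by
  unfold totalB
  rw [PySem.Dict.items_counter]
  refine Eq.trans ?_ ((sum_count_filter (PySem.Set.ofList l) l (inRange lo hi)
      (PySem.Set.nodup_ofList l)).trans ?_)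
  · simp only [List.filter_map, List.map_map]
    rfl
  · exact_mod_cast congrArg (Nat.cast : Nat → Int) (List.countP_congr (fun x hx => by
      simp [List.contains_eq_mem, PySem.Set.mem_ofList, hx]))

theorem countP_map_wc (ps : List (List Char)) (q : Nat → Bool) :
    (ps.map wcOf).countP q = ps.countP (fun p => q (wcOf p)) := by
  rw [List.countP_map]; rfl

-- ===== VERDICT (by name: the statement is the Claim_ definition above) =====
theorem categorize_phrases_spec : Claim_equal_categorize_phrases := by
  intro text _
  unfold Spec_categorize_phrases categorize_phrases categorize_phrases_alt
  simp only [catInit_eq, foldA]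
  rw [show (fun p => (PySem.Chars.split₀ p).length) = wcOf from rfl]
  simp only [total_eq, countP_map_wc]
  rw [show (fun p : List Char => ((p.countP (fun ch => pyPunctuation.contains ch) : Nat) : Int)) = pcOf from rfl]
  have e1 : (fun p : List Char => inRange 0 (some 3) (wcOf p)) = (fun p : List Char => decide (wcOf p < 3)) := by
    funext p; simp [inRange]
  have e2 : (fun p : List Char => inRange 3 (some 5) (wcOf p)) = (fun p : List Char => decide (3 ≤ wcOf p ∧ wcOf p < 5)) := by
    funext p; simp [inRange]
  have e3 : (fun p : List Char => inRange 5 (some 10) (wcOf p)) = (fun p : List Char => decide (5 ≤ wcOf p ∧ wcOf p < 10)) := by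
    funext p; simp [inRange]
  have e4 : (fun p : List Char => inRange 10 none (wcOf p)) = (fun p : List Char => decide (10 ≤ wcOf p)) := by
    funext p; simp [inRange]
  have e5 : (fun p : List Char => inRange 0 (some 25) (wcOf p)) = (fun p : List Char => decide (wcOf p < 25)) := by
    funext p; simp [inRange]
  have e6 : (fun p : List Char => inRange 25 (some 75) (wcOf p)) = (fun p : List Char => decide (25 ≤ wcOf p ∧ wcOf p < 75)) := by
    funext p; simp [inRange]
  have e7 : (fun p : List Char => inRange 75 (some 160) (wcOf p)) = (fun p : List Char => decide (75 ≤ wcOf p ∧ wcOf p < 160)) := by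
    funext p; simp [inRange]
  have e8 : (fun p : List Char => inRange 160 none (wcOf p)) = (fun p : List Char => decide (160 ≤ wcOf p)) := by
    funext p; simp [inRange]
  rw [e1, e2, e3, e4, e5, e6, e7, e8]
  simp [mkD]
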